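-- pv_equiv track=rewrite | github.com/yg-margo/ITMO-university | discret-math/lab-3/23.py | kod
-- ===== SOURCE A (Python) =====
-- def kod(arr):
--     arr = [i for i in arr]
--     n = len(arr) - 1
--     while (n >= 0) and\
--             (arr[n] != '0'):
--         arr[n] = '0'
--         n -= 1
--     if n == -1:
--         return '-'
--     arr[n] = '1'
--     return ''.join(arr)
-- ===== SOURCE B (Python) =====
-- def kod(arr):
--     last0 = -1
--     for i, x in enumerate(arr):
--         if x == '0':
--             last0 = i
--     if last0 == -1:
--         return '-'
--     return ''.join(list(arr)[:last0] + ['1'] + ['0'] * (len(arr) - last0 - 1))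
-- ===== Notes on version B (the rewrite author's own statement) =====
-- stated objective: alternative
-- what changed: B does a single forward enumerate pass recording the last index equal to '0' and then builds the answer from the original prefix plus '1' and a run of '0's, instead of A's destructive backward while-loop that mutates a copy of the list.
import Mathlib
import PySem

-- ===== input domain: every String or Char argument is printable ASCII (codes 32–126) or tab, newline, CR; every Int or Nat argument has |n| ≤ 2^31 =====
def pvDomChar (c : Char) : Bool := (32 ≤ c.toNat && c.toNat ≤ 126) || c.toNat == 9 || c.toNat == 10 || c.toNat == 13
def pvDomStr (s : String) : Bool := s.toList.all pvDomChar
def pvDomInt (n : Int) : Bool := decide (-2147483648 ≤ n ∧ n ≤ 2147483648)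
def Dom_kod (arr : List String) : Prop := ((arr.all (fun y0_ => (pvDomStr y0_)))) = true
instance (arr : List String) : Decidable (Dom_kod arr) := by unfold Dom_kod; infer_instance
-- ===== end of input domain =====

-- B replaces A's destructive backward while-loop by a forward pass for the last '0' plus direct assembly; alternative decomposition, same cost.

-- B replaces A's destructive backward while-loop by a forward pass for the last '0' plus direct assembly; alternative decomposition, same cost.

-- ===== PORT A =====
-- the while loop: n counts down; 'n >= 0' is encoded by the Nat recursion, the n = -1 exit is the 'none' result
def kodGo : Nat → List String → List String × Option Nat
  | 0, arr => if arr.getD 0 "" = "0" then (arr, some 0) else (arr.set 0 "0", none)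
  | m + 1, arr =>
    if arr.getD (m + 1) "" = "0" then (arr, some (m + 1))
    else kodGo m (arr.set (m + 1) "0")

def kod (arr : List String) : String :=
  match arr.length with
  | 0 => "-"                      -- n = len - 1 = -1: loop skipped, 'return -'
  | m + 1 =>
    match kodGo m arr with
    | (_, none) => "-"
    | (a, some k) => PySem.Str.join "" (a.set k "1")

-- ===== PORT B =====
def kod_alt (arr : List String) : String :=
  let last0 : Int := (PySem.List.enumerate arr).foldl (fun acc p => if p.2 = "0" then p.1 else acc) (-1)
  if last0 = -1 then "-"
  else PySem.Str.join "" (arr.take last0.toNat ++ ["1"] ++ List.replicate (arr.length - last0.toNat - 1) "0")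

-- ===== PRECONDITION & SPEC =====
def Spec_kod (arr : List String) (out : String) : Prop := out = kod_alt arr
instance (arr : List String) (out : String) : Decidable (Spec_kod arr out) := by unfold Spec_kod; infer_instance

-- ===== CLAIM (what is proved, stated in full; the proofs are below) =====
def Claim_equal_kod : Prop := ∀ (arr : List String), Dom_kod arr → Spec_kod arr (kod arr)

-- ===== LEMMAS AND PROOFS =====

-- canonical form of the answer (as the list of pieces to join), computed on the reversed input
def specR : List String → Option (List String)
  | [] => none
  | x :: xs => if x = "0" then some (xs.reverse ++ ["1"]) else (specR xs).map (· ++ ["0"])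

def last0A (arr : List String) : Int :=
  (PySem.List.enumerate arr).foldl (fun acc p => if p.2 = "0" then p.1 else acc) (-1)

theorem kodGo_length (n : Nat) (arr : List String) : ((kodGo n arr).1).length = arr.length := by
  induction n generalizing arr with
  | zero => simp only [kodGo]; split <;> simp
  | succ m ih => simp only [kodGo]; split <;> simp [ih]

theorem kodGo_some_le (n : Nat) (arr : List String) (k : Nat)
    (h : (kodGo n arr).2 = some k) : k ≤ n := by
  induction n generalizing arr with
  | zero => simp only [kodGo] at h; split at h <;> simp_all
  | succ m ih =>
    simp only [kodGo] at h
    split at h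
    · simp at h; omega
    · exact Nat.le_trans (ih _ h) (Nat.le_succ m)

theorem kodGo_append (n : Nat) (xs : List String) (y : String) (h : n < xs.length) :
    kodGo n (xs ++ [y]) = ((kodGo n xs).1 ++ [y], (kodGo n xs).2) := by
  induction n generalizing xs with
  | zero =>
    simp only [kodGo]
    rw [List.getD_append _ _ _ _ h]
    split
    · rfl
    · rw [List.set_append_left _ _ h]
  | succ m ih =>
    simp only [kodGo]
    rw [List.getD_append _ _ _ _ h]
    split
    · rfl
    · rw [List.set_append_left _ _ h]
      exact ih (xs.set (m + 1) "0") (by simp; omega)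

theorem lemA (r : List String) : ∀ (x : String),
    (match kodGo r.length (r.reverse ++ [x]) with
     | (_, none) => (none : Option (List String))
     | (a, some k) => some (a.set k "1")) = specR (x :: r) := by
  induction r with
  | nil =>
    intro x
    by_cases hx : x = "0" <;> simp [kodGo, specR, hx]
  | cons y r' ih =>
    intro x
    simp only [List.length_cons]
    have hget : (((y :: r').reverse ++ [x])).getD (r'.length + 1) "" = x := by
      rw [List.getD_append_right _ _ _ _ (by simp)]; simp
    by_cases hx : x = "0"
    · subst hx
      simp only [kodGo, hget, if_pos]
      have hset : ((y :: r').reverse ++ ["0"]).set (r'.length + 1) "1"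
          = (y :: r').reverse ++ ["1"] := by
        rw [List.set_append]; simp
      simp only [specR, if_pos, hset]
    · simp only [kodGo, hget, if_neg hx]
      have hset : ((y :: r').reverse ++ [x]).set (r'.length + 1) "0"
          = (y :: r').reverse ++ ["0"] := by
        rw [List.set_append]; simp
      rw [hset, kodGo_append r'.length ((y :: r').reverse) "0" (by simp)]
      have hrev : (y :: r').reverse = r'.reverse ++ [y] := by simp
      rw [hrev]
      have key := ih y
      rw [show specR (x :: y :: r') = (specR (y :: r')).map (· ++ ["0"]) by
        simp [specR, hx]]
      rw [← key]
      rcases hgo : kodGo r'.length (r'.reverse ++ [y]) with ⟨a, b⟩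
      cases b with
      | none => simp
      | some k =>
        have hk : k ≤ r'.length := by
          have h2 := kodGo_some_le r'.length (r'.reverse ++ [y]) k
          rw [hgo] at h2; exact h2 rfl
        have hl : a.length = r'.length + 1 := by
          have h2 := kodGo_length r'.length (r'.reverse ++ [y])
          rw [hgo] at h2; simpa using h2
        simp only [Option.map_some]
        rw [List.set_append_left _ _ (by omega)]

theorem kod_eq (arr : List String) :
    kod arr = ((specR arr.reverse).map (PySem.Str.join "")).getD "-" := by
  rcases eq_or_ne arr [] with rfl | hne
  · simp [kod, specR]
  · have hsplit : arr.dropLast.reverse.reverse ++ [arr.getLast hne] = arr := by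
      simpa using List.dropLast_append_getLast hne
    have hrev : arr.reverse = arr.getLast hne :: arr.dropLast.reverse := by
      conv_lhs => rw [← hsplit]
      simp
    have hlen : arr.length = arr.dropLast.reverse.length + 1 := by
      rw [← hsplit]; simp
    have key := lemA arr.dropLast.reverse (arr.getLast hne)
    rw [hsplit] at key
    unfold kod
    rw [hlen]
    have hl2 : arr.length - 1 = arr.dropLast.reverse.length := by omega
    rw [hrev, ← key]
    rcases hgo : kodGo arr.dropLast.reverse.length arr with ⟨a, b⟩
    simp only [hgo]
    cases b <;> simp

theorem last0A_append (ys : List String) (x : String) :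
    last0A (ys ++ [x]) = if x = "0" then (ys.length : Int) else last0A ys := by
  unfold last0A
  rw [PySem.List.enumerate_append]
  simp [PySem.List.enumerate_cons, PySem.List.enumerate_nil]

theorem lemB (arr : List String) :
    (last0A arr = -1 ∧ specR arr.reverse = none) ∨
    (∃ k : Nat, last0A arr = (k : Int) ∧ k < arr.length ∧
      specR arr.reverse = some (arr.take k ++ ["1"] ++ List.replicate (arr.length - k - 1) "0")) := by
  induction arr using List.reverseRecOn with
  | nil => left; constructor <;> simp [last0A, specR, PySem.List.enumerate_nil]
  | append_singleton ys x ih =>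
    rw [last0A_append]
    have hrev : (ys ++ [x]).reverse = x :: ys.reverse := by simp
    by_cases hx : x = "0"
    · right
      refine ⟨ys.length, by simp [hx], by simp, ?_⟩
      subst hx
      rw [hrev]
      simp [specR, List.take_append_of_le_length (le_refl ys.length)]
    · rw [hrev]
      simp only [hx, if_false, specR]
      rcases ih with ⟨h1, h2⟩ | ⟨k, h1, h2, h3⟩
      · left; simp [h1, h2]
      · right
        refine ⟨k, h1, by simp; omega, ?_⟩
        rw [h3]
        simp only [Option.map_some, Option.some.injEq]
        rw [List.take_append_of_le_length (Nat.le_of_lt h2)]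
        have hrepl : (ys ++ [x]).length - k - 1 = (ys.length - k - 1) + 1 := by simp; omega
        rw [hrepl, List.replicate_succ']
        simp

theorem alt_eq (arr : List String) :
    kod_alt arr = ((specR arr.reverse).map (PySem.Str.join "")).getD "-" := by
  show (if last0A arr = -1 then "-"
        else PySem.Str.join "" (arr.take (last0A arr).toNat ++ ["1"]
              ++ List.replicate (arr.length - (last0A arr).toNat - 1) "0"))
      = ((specR arr.reverse).map (PySem.Str.join "")).getD "-"
  rcases lemB arr with ⟨h1, h2⟩ | ⟨k, h1, h2, h3⟩
  · simp [h1, h2]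
  · rw [h1, h3]
    have hne : ((k : Int)) ≠ -1 := by omega
    simp [hne]

-- ===== VERDICT (by name: the statement is the Claim_ definition above) =====
theorem kod_spec : Claim_equal_kod := by
  intro arr _
  unfold Spec_kod
  rw [kod_eq, alt_eq]
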